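-- pv_equiv track=rewrite | github.com/imk4fleur/algo_labs | lab4/3.py | check
-- ===== SOURCE A (Python) =====
-- def check(P, T):
--     alph = {}
--     for i in range(len(T) - len(P)):
--         if T[i] not in alph:
--             alph[T[i]] = []
--     for i in range(len(P)):
--         if P[i] not in alph:
--             return False
--     return True
-- ===== SOURCE B (Python) =====
-- def check(P, T):
--     need = set(P)
--     for i in range(len(T) - len(P)):
--         need.discard(T[i])
--         if not need:
--             return True
--     return not need
-- ===== Notes on version B (the rewrite author's own statement) =====
-- stated objective: alternative
-- what changed: Instead of building a dict of all prefix characters and then scanning P, B builds the required set need = set(P) once and shrinks it while scanning the prefix, returning True as soon as need is empty.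
import Mathlib
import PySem

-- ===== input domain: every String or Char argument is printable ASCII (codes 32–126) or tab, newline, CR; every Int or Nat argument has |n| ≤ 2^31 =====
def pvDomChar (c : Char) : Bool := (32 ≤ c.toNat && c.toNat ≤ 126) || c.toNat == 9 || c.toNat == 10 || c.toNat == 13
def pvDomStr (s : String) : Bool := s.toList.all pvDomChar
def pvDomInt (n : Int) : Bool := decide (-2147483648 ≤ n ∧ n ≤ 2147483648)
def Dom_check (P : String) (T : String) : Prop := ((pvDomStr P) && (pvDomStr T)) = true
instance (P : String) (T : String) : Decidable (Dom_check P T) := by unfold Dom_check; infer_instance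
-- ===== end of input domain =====

-- B replaces A's dict-of-prefix-chars-then-scan-P by a shrinking required set built from P,
-- consumed while scanning the prefix with an early exit (alternative decomposition, same cost).


-- ===== PORT A =====
-- second loop of A, with its early `return False`
def checkLoopA (Pl : List Char) (alph : PySem.Dict Char (List Int)) : List Int → Bool
  | [] => true
  | i :: rest =>
    if !(alph.contains (PySem.List.pyGetD Pl i ' ')) then false
    else checkLoopA Pl alph rest

def check (P : String) (T : String) : Bool :=
  let Pl := P.toList
  let Tl := T.toList
  let alph : PySem.Dict Char (List Int) :=
    (PySem.List.pyRange 0 (PySem.List.len Tl - PySem.List.len Pl) 1).foldl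
      (fun d i =>
        if !(d.contains (PySem.List.pyGetD Tl i ' ')) then
          d.insert (PySem.List.pyGetD Tl i ' ') ([] : List Int)
        else d)
      PySem.Dict.empty
  checkLoopA Pl alph (PySem.List.pyRange 0 (PySem.List.len Pl) 1)

-- ===== PORT B =====
-- B's loop: discard T[i] from need, early `return True` when need becomes empty
def checkLoopB (Tl : List Char) (need : PySem.Set Char) : List Int → Bool
  | [] => need.isEmpty
  | i :: rest =>
    let need' := PySem.Set.discard need (PySem.List.pyGetD Tl i ' ')
    if need'.isEmpty then true else checkLoopB Tl need' rest

def check_alt (P : String) (T : String) : Bool :=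
  let Tl := T.toList
  let need := PySem.Set.ofList P.toList
  checkLoopB Tl need
    (PySem.List.pyRange 0 (PySem.List.len Tl - PySem.List.len P.toList) 1)

-- ===== PRECONDITION & SPEC =====
def Spec_check (P : String) (T : String) (out : Bool) : Prop := out = check_alt P T
instance (P : String) (T : String) (out : Bool) : Decidable (Spec_check P T out) := by unfold Spec_check; infer_instance

-- ===== CLAIM (what is proved, stated in full; the proofs are below) =====
def Claim_equal_check : Prop := ∀ (P : String) (T : String), Dom_check P T → Spec_check P T (check P T)

-- ===== LEMMAS AND PROOFS =====

-- A's dict fold over the prefix indices: membership is "some scanned char equals x (or already a key)"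
theorem containsA_foldl (Tl : List Char) (idxs : List Int) (d : PySem.Dict Char (List Int)) (x : Char) :
    (idxs.foldl
        (fun d i =>
          if !(d.contains (PySem.List.pyGetD Tl i ' ')) then
            d.insert (PySem.List.pyGetD Tl i ' ') ([] : List Int)
          else d) d).contains x
      = (d.contains x || (idxs.map (fun i => PySem.List.pyGetD Tl i ' ')).contains x) := by
  induction idxs generalizing d with
  | nil => simp
  | cons i rest ih =>
    simp only [List.foldl_cons, List.map_cons, ih]
    by_cases hd : d.contains (PySem.List.pyGetD Tl i ' ') = true
    · rw [hd, Bool.not_true, if_neg (by simp), Bool.eq_iff_iff]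
      rcases eq_or_ne x (PySem.List.pyGetD Tl i ' ') with rfl | hx
      · simp [hd]
      · simp [hx]
    · rw [Bool.not_eq_true] at hd
      rw [hd, Bool.not_false, if_pos rfl, Bool.eq_iff_iff]
      simp only [PySem.Dict.contains_insert, List.contains_cons]
      rcases eq_or_ne x (PySem.List.pyGetD Tl i ' ') with rfl | hx
      · simp
      · simp [hx]

-- A's second loop is an `all` over Pl
theorem checkLoopA_eq (Pl : List Char) (alph : PySem.Dict Char (List Int)) :
    checkLoopA Pl alph (PySem.List.pyRange 0 (PySem.List.len Pl) 1)
      = Pl.all (fun c => alph.contains c) := by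
  suffices h : ∀ (idxs : List Int),
      checkLoopA Pl alph idxs = (idxs.map (fun i => PySem.List.pyGetD Pl i ' ')).all
        (fun c => alph.contains c) by
    rw [h, PySem.List.map_pyGetD_pyRange_zero]
  intro idxs
  induction idxs with
  | nil => rfl
  | cons i rest ih =>
    simp only [checkLoopA, List.map_cons, List.all_cons, ih]
    by_cases h : alph.contains (PySem.List.pyGetD Pl i ' ') = true <;> simp [h]

-- proof-side form of B's loop, over the scanned characters
def auxB (need : PySem.Set Char) : List Char → Bool
  | [] => need.isEmpty
  | c :: cs =>
    let need' := PySem.Set.discard need c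
    if need'.isEmpty then true else auxB need' cs

theorem checkLoopB_eq_auxB (Tl : List Char) (need : PySem.Set Char) (idxs : List Int) :
    checkLoopB Tl need idxs = auxB need (idxs.map (fun i => PySem.List.pyGetD Tl i ' ')) := by
  induction idxs generalizing need with
  | nil => rfl
  | cons i rest ih => simp only [checkLoopB, List.map_cons, auxB, ih]

theorem discard_all (need : PySem.Set Char) (c : Char) (cs : List Char) :
    (PySem.Set.discard need c).all (fun x => cs.contains x)
      = need.all (fun x => (c :: cs).contains x) := by
  rw [Bool.eq_iff_iff]
  simp only [List.all_eq_true, List.contains_cons]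
  constructor
  · intro h x hx
    rcases eq_or_ne x c with rfl | hxc
    · simp
    · have hcs := h x ((PySem.Set.mem_discard need c x).mpr ⟨hx, hxc⟩)
      simp at hcs ⊢
      tauto
  · intro h x hx
    obtain ⟨hxn, hxc⟩ := (PySem.Set.mem_discard need c x).mp hx
    have := h x hxn
    simpa [hxc] using this

-- B's loop answers "is every needed char among the scanned chars"
theorem auxB_eq (cs : List Char) (need : PySem.Set Char) :
    auxB need cs = need.all (fun x => cs.contains x) := by
  induction cs generalizing need with
  | nil => cases need <;> simp [auxB]
  | cons c cs ih =>
    show (if (PySem.Set.discard need c).isEmpty then true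
          else auxB (PySem.Set.discard need c) cs) = _
    rw [ih, discard_all]
    by_cases he : (PySem.Set.discard need c).isEmpty = true
    · rw [if_pos he, Bool.eq_iff_iff]
      simp only [List.all_eq_true, true_iff]
      intro x hx
      have h0 : PySem.Set.discard need c = [] := by simpa [List.isEmpty_iff] using he
      rcases eq_or_ne x c with rfl | hxc
      · simp
      · exact absurd ((PySem.Set.mem_discard need c x).mpr ⟨hx, hxc⟩) (by simp [h0])
    · rw [if_neg he]

theorem all_ofList (xs : List Char) (p : Char → Bool) :
    (PySem.Set.ofList xs).all p = xs.all p := by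
  rw [Bool.eq_iff_iff]
  simp only [List.all_eq_true]
  constructor <;> intro h x hx
  · exact h x ((PySem.Set.mem_ofList xs x).mpr hx)
  · exact h x ((PySem.Set.mem_ofList xs x).mp hx)

-- ===== VERDICT (by name: the statement is the Claim_ definition above) =====
theorem check_spec : Claim_equal_check := by
  intro P T _
  unfold Spec_check check check_alt
  simp only [checkLoopA_eq, checkLoopB_eq_auxB, auxB_eq, containsA_foldl,
    PySem.Dict.contains_empty, Bool.false_or, all_ofList]
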